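-- pv_equiv track=rewrite | github.com/Cartoon-for-Blind/Cartoon-for-blind-MLserver | yolov8_panel.py | sort_panels
-- ===== SOURCE A (Python) =====
-- def sort_panels(boxes_with_objects, y_threshold=20):
--
--     # 먼저 y1 값을 기준으로 오름차순 정렬
--     boxes_with_objects.sort(key=lambda item: item[0][1])
--
--     # 비슷한 y 값 그룹으로 나누기
--     grouped_boxes = []
--     current_group = [boxes_with_objects[0]]
--
--     for i in range(1, len(boxes_with_objects)):
--         _, y1_current, _, _ = boxes_with_objects[i][0]
--         _, y1_last, _, _ = boxes_with_objects[i - 1][0]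
--
--         # y 값이 임계값 이내라면 같은 그룹에 추가
--         if abs(y1_current - y1_last) <= y_threshold:
--             current_group.append(boxes_with_objects[i])
--         else:
--             # 새로운 그룹 생성
--             grouped_boxes.append(current_group)
--             current_group = [boxes_with_objects[i]]
--
--     # 마지막 그룹 추가
--     if current_group:
--         grouped_boxes.append(current_group)
--
--     # 각 그룹 내에서 x1 값을 기준으로 정렬
--     for group in grouped_boxes:
--         group.sort(key=lambda item: item[0][0])  # x1을 기준으로 정렬
--
--     # 그룹을 flatten하여 반환
--     sorted_boxes = [item for group in grouped_boxes for item in group]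
--     return sorted_boxes
-- ===== SOURCE B (Python) =====
-- def sort_panels(boxes_with_objects, y_threshold=20):
--     # same in-place sort by y1 as A (mutates the argument identically)
--     boxes_with_objects.sort(key=lambda item: item[0][1])
--
--     # one linear pass assigning each item an integer row id
--     keyed = []
--     gid = 0
--     prev_y = None
--     for item in boxes_with_objects:
--         y1 = item[0][1]
--         if prev_y is not None and abs(y1 - prev_y) > y_threshold:
--             gid += 1
--         keyed.append((gid, item[0][0], item))
--         prev_y = y1
--
--     # one composite stable sort replaces per-group sorts + flatten
--     keyed.sort(key=lambda t: (t[0], t[1]))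
--     return [t[2] for t in keyed]
-- ===== Notes on version B (the rewrite author's own statement) =====
-- stated objective: alternative
-- what changed: Replaces A's list-of-groups construction, per-group x1 sorts and flatten by a single linear pass that labels each y-sorted item with a row id, followed by one composite stable sort on (row id, x1).
-- crash fix: On the empty list A raises IndexError (it indexes boxes_with_objects[0]); B naturally returns []. — e.g. on sort_panels([], 20): A raises IndexError, B returns []
import Mathlib
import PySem

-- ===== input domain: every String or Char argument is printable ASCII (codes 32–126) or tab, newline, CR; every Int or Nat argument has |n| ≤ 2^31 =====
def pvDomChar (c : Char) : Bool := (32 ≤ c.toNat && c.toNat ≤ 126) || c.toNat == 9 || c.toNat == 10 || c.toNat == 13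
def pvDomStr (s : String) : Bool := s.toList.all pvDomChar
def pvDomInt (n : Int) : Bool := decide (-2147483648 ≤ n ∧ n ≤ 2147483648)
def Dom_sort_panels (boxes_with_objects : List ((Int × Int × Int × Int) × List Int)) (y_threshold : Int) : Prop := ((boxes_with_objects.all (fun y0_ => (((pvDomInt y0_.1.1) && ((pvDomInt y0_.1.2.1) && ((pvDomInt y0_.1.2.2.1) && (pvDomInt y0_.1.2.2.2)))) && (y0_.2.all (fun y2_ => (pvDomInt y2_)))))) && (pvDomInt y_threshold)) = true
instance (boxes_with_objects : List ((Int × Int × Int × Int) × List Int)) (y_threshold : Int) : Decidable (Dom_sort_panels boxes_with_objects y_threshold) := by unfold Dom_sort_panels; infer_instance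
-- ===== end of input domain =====

-- B replaces A's list-of-groups / per-group sorts / flatten by a row-id labelling pass plus one
-- composite stable sort on (row id, x1); both versions mutate the argument identically (the in-place
-- y1 sort), and the equivalence proved here is about the return value.


abbrev PvBox : Type := (Int × Int × Int × Int) × List Int

-- ===== PORT A =====
-- A's index loop 'for i in range(1, len(s))' compares s[i] with s[i-1]; it is transcribed as the
-- obvious structural recursion over the tail carrying the previous element and A's exact state
-- (grouped_boxes, current_group), with the same appends in the same order.
def pvGroupsA (thr : Int) (prev : PvBox) (gs : List (List PvBox)) (cur : List PvBox) : List PvBox → List (List PvBox)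
  | [] => if cur = [] then gs else gs ++ [cur]      -- 'if current_group: grouped_boxes.append(current_group)'
  | x :: rest =>
      if |x.1.2.1 - prev.1.2.1| ≤ thr then pvGroupsA thr x gs (cur ++ [x]) rest
      else pvGroupsA thr x (gs ++ [cur]) [x] rest

def sort_panels (boxes_with_objects : List ((Int × Int × Int × Int) × List Int)) (y_threshold : Int) : List ((Int × Int × Int × Int) × List Int) :=
  let s := PySem.List.sorted boxes_with_objects (fun item => item.1.2.1) false
  match s with
  | [] => []      -- Python raises IndexError at boxes_with_objects[0]; excluded by Pre_
  | first :: rest =>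
      let grouped := pvGroupsA y_threshold first [] [first] rest
      (grouped.map (fun g => PySem.List.sorted g (fun item => item.1.1) false)).flatten

-- ===== PORT B =====
-- Source B's labelling loop: state (keyed, gid, prev_y), one append per item.
def pvStepB (thr : Int) (st : List (Int × Int × PvBox) × Int × Option Int) (item : PvBox) : List (Int × Int × PvBox) × Int × Option Int :=
  let y1 := item.1.2.1
  let gid := match st.2.2 with
    | some p => if thr < |y1 - p| then st.2.1 + 1 else st.2.1
    | none => st.2.1
  (st.1 ++ [(gid, item.1.1, item)], gid, some y1)

def sort_panels_alt (boxes_with_objects : List ((Int × Int × Int × Int) × List Int)) (y_threshold : Int) : List ((Int × Int × Int × Int) × List Int) :=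
  let s := PySem.List.sorted boxes_with_objects (fun item => item.1.2.1) false
  let keyed := (s.foldl (pvStepB y_threshold) ([], 0, none)).1
  (PySem.List.sorted2 keyed (fun t => t.1) (fun t => t.2.1) false).map (fun t => t.2.2)

-- ===== PRECONDITION & SPEC =====
-- Pre_ excludes only the empty list, on which A raises IndexError (boxes_with_objects[0]).
def Pre_sort_panels (boxes_with_objects : List ((Int × Int × Int × Int) × List Int)) (y_threshold : Int) : Prop := boxes_with_objects ≠ []
instance (boxes_with_objects : List ((Int × Int × Int × Int) × List Int)) (y_threshold : Int) : Decidable (Pre_sort_panels boxes_with_objects y_threshold) := by unfold Pre_sort_panels; infer_instance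
def pvWitness_sort_panels : (List ((Int × Int × Int × Int) × List Int)) × Int := ([((1, 2, 3, 4), [0]), ((0, 30, 1, 1), [])], 20)

-- On the empty list A raises IndexError (it indexes boxes_with_objects[0]); B naturally returns [].
def Raises_sort_panels (boxes_with_objects : List ((Int × Int × Int × Int) × List Int)) (y_threshold : Int) : Prop := boxes_with_objects = []
instance (boxes_with_objects : List ((Int × Int × Int × Int) × List Int)) (y_threshold : Int) : Decidable (Raises_sort_panels boxes_with_objects y_threshold) := by unfold Raises_sort_panels; infer_instance
def pvRaiseWitness_sort_panels : (List ((Int × Int × Int × Int) × List Int)) × Int := ([], 20)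
def pvRaiseWitnessOut_sort_panels : List ((Int × Int × Int × Int) × List Int) := []

def Spec_sort_panels (boxes_with_objects : List ((Int × Int × Int × Int) × List Int)) (y_threshold : Int) (out : List ((Int × Int × Int × Int) × List Int)) : Prop := out = sort_panels_alt boxes_with_objects y_threshold
instance (boxes_with_objects : List ((Int × Int × Int × Int) × List Int)) (y_threshold : Int) (out : List ((Int × Int × Int × Int) × List Int)) : Decidable (Spec_sort_panels boxes_with_objects y_threshold out) := by unfold Spec_sort_panels; infer_instance

-- ===== CLAIM (what is proved, stated in full; the proofs are below) =====
def Claim_equal_sort_panels : Prop := ∀ (boxes_with_objects : List ((Int × Int × Int × Int) × List Int)) (y_threshold : Int), Dom_sort_panels boxes_with_objects y_threshold → Pre_sort_panels boxes_with_objects y_threshold → Spec_sort_panels boxes_with_objects y_threshold (sort_panels boxes_with_objects y_threshold)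
def Claim_raises_sort_panels : Prop := (∀ (boxes_with_objects : List ((Int × Int × Int × Int) × List Int)) (y_threshold : Int), Dom_sort_panels boxes_with_objects y_threshold → Raises_sort_panels boxes_with_objects y_threshold → ¬ Pre_sort_panels boxes_with_objects y_threshold) ∧ (Dom_sort_panels (pvRaiseWitness_sort_panels.1) (pvRaiseWitness_sort_panels.2) ∧ Raises_sort_panels (pvRaiseWitness_sort_panels.1) (pvRaiseWitness_sort_panels.2) ∧ sort_panels_alt (pvRaiseWitness_sort_panels.1) (pvRaiseWitness_sort_panels.2) = pvRaiseWitnessOut_sort_panels)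

-- ===== LEMMAS AND PROOFS =====

-- Accumulator-free form of A's grouping.
def pvGroupsF (thr : Int) (prev : PvBox) (cur : List PvBox) : List PvBox → List (List PvBox)
  | [] => [cur]
  | x :: rest =>
      if |x.1.2.1 - prev.1.2.1| ≤ thr then pvGroupsF thr x (cur ++ [x]) rest
      else cur :: pvGroupsF thr x [x] rest

-- The row-id annotation of a list of groups, starting at id g.
def pvAnn (g : Int) : List (List PvBox) → List (Int × Int × PvBox)
  | [] => []
  | grp :: gs => grp.map (fun it => (g, it.1.1, it)) ++ pvAnn (g + 1) gs

theorem pvGroupsA_eq (thr : Int) (l : List PvBox) : ∀ (prev : PvBox) (gs : List (List PvBox)) (cur : List PvBox), cur ≠ [] → pvGroupsA thr prev gs cur l = gs ++ pvGroupsF thr prev cur l := by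
  induction l with
  | nil => intro prev gs cur hc; simp [pvGroupsA, pvGroupsF, hc]
  | cons x rest ih =>
      intro prev gs cur hc
      simp only [pvGroupsA, pvGroupsF]
      by_cases h : |x.1.2.1 - prev.1.2.1| ≤ thr
      · simp [h, ih x gs (cur ++ [x]) (by simp)]
      · simp [h, ih x (gs ++ [cur]) [x] (by simp)]

theorem pvFoldB_eq (thr : Int) (rest : List PvBox) : ∀ (acc : List (Int × Int × PvBox)) (g : Int) (cur : List PvBox) (prev : PvBox),
    (rest.foldl (pvStepB thr) (acc ++ cur.map (fun it => (g, it.1.1, it)), g, some prev.1.2.1)).1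
      = acc ++ pvAnn g (pvGroupsF thr prev cur rest) := by
  induction rest with
  | nil => intro acc g cur prev; simp [pvGroupsF, pvAnn]
  | cons x rest ih =>
      intro acc g cur prev
      simp only [List.foldl_cons, pvStepB, pvGroupsF]
      by_cases h : |x.1.2.1 - prev.1.2.1| ≤ thr
      · have hx : ¬ thr < |x.1.2.1 - prev.1.2.1| := not_lt.mpr h
        simp only [hx, if_pos, h, ite_false]
        have := ih acc g (cur ++ [x]) x
        simpa [List.map_append, List.append_assoc] using this
      · have hx : thr < |x.1.2.1 - prev.1.2.1| := not_le.mp h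
        simp only [h, hx, ite_true, ite_false]
        have := ih (acc ++ cur.map (fun it => (g, it.1.1, it))) (g + 1) [x] x
        simp only [pvAnn]
        simpa [List.append_assoc] using this

-- generic insertion-sort facts (abstract 'before')
theorem pv_insertBy_append {α : Type} (before : α → α → Bool) (x : α) (l1 l2 : List α) (h : ∀ a ∈ l1, before x a = false) : PySem.List.insertBy before x (l1 ++ l2) = l1 ++ PySem.List.insertBy before x l2 := by
  induction l1 with
  | nil => simp
  | cons a l1 ih =>
      simp only [List.cons_append, PySem.List.insertBy]
      rw [h a (by simp)]
      simp [ih (fun b hb => h b (by simp [hb]))]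

theorem pv_mem_foldl_insertBy {α : Type} (before : α → α → Bool) (l : List α) : ∀ (acc : List α) (y : α), y ∈ l.foldl (fun acc x => PySem.List.insertBy before x acc) acc → y ∈ l ∨ y ∈ acc := by
  induction l with
  | nil => intro acc y h; simpa using h
  | cons x l ih =>
      intro acc y h
      rcases ih _ y h with h' | h'
      · exact Or.inl (by simp [h'])
      · rcases (PySem.List.mem_insertBy before x y acc).mp h' with h'' | h''
        · exact Or.inl (by simp [h''])
        · exact Or.inr h''

theorem pv_foldl_insertBy_append {α : Type} (before : α → α → Bool) (k : List α) : ∀ (l1 acc : List α), (∀ x ∈ k, ∀ a ∈ l1, before x a = false) → k.foldl (fun acc x => PySem.List.insertBy before x acc) (l1 ++ acc) = l1 ++ k.foldl (fun acc x => PySem.List.insertBy before x acc) acc := by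
  induction k with
  | nil => intro l1 acc _; simp
  | cons x k ih =>
      intro l1 acc h
      simp only [List.foldl_cons]
      rw [pv_insertBy_append before x l1 acc (fun a ha => h x (by simp) a ha)]
      exact ih l1 _ (fun y hy a ha => h y (by simp [hy]) a ha)

theorem pv_foldl_insertBy_split {α : Type} (before : α → α → Bool) (k1 k2 : List α) (h : ∀ x ∈ k2, ∀ a ∈ k1, before x a = false) : (k1 ++ k2).foldl (fun acc x => PySem.List.insertBy before x acc) [] = k1.foldl (fun acc x => PySem.List.insertBy before x acc) [] ++ k2.foldl (fun acc x => PySem.List.insertBy before x acc) [] := by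
  rw [List.foldl_append]
  have := pv_foldl_insertBy_append before k2 (k1.foldl (fun acc x => PySem.List.insertBy before x acc) []) [] ?_
  · simpa using this
  · intro x hx a ha
    rcases pv_mem_foldl_insertBy before k1 [] a ha with h' | h'
    · exact h x hx a h'
    · simp at h'

theorem pv_insertBy_map {α β : Type} (before : β → β → Bool) (before' : α → α → Bool) (f : α → β) (x : α) (l : List α) (h : ∀ a b : α, before (f a) (f b) = before' a b) : PySem.List.insertBy before (f x) (l.map f) = (PySem.List.insertBy before' x l).map f := by
  induction l with
  | nil => simp [PySem.List.insertBy]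
  | cons a l ih =>
      simp only [List.map_cons, PySem.List.insertBy, h]
      by_cases hb : before' x a = true
      · simp [hb]
      · simp [hb, ih]

theorem pv_foldl_insertBy_map {α β : Type} (before : β → β → Bool) (before' : α → α → Bool) (f : α → β) (l : List α) (h : ∀ a b : α, before (f a) (f b) = before' a b) : ∀ acc : List α, (l.map f).foldl (fun acc x => PySem.List.insertBy before x acc) (acc.map f) = (l.foldl (fun acc x => PySem.List.insertBy before' x acc) acc).map f := by
  induction l with
  | nil => intro acc; simp
  | cons x l ih =>
      intro acc
      simp only [List.map_cons, List.foldl_cons]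
      rw [pv_insertBy_map before before' f x acc h]
      exact ih _

theorem pv_mem_pvAnn_fst (gs : List (List PvBox)) : ∀ (g : Int) (t : Int × Int × PvBox), t ∈ pvAnn g gs → g ≤ t.1 := by
  induction gs with
  | nil => intro g t h; simp [pvAnn] at h
  | cons grp gs ih =>
      intro g t h
      simp only [pvAnn, List.mem_append, List.mem_map] at h
      rcases h with ⟨a, _, rfl⟩ | h
      · exact le_refl _
      · exact le_trans (by omega) (ih (g + 1) t h)

-- the composite stable sort of the annotated groups is the concatenation of the per-group x1 sorts
theorem pv_sorted2_pvAnn (gs : List (List PvBox)) : ∀ g : Int, (PySem.List.sorted2 (pvAnn g gs) (fun t => t.1) (fun t => t.2.1) false).map (fun t => t.2.2) = (gs.map (fun grp => PySem.List.sorted grp (fun item => item.1.1) false)).flatten := by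
  induction gs with
  | nil => intro g; simp [pvAnn, PySem.List.sorted2, Bool.false_eq_true]
  | cons grp gs ih =>
      intro g
      simp only [pvAnn, PySem.List.sorted2, PySem.List.sorted, List.map_cons, List.flatten_cons, Bool.false_eq_true, if_false]
      rw [pv_foldl_insertBy_split _ _ _ ?_]
      · rw [List.map_append]
        congr 1
        · have hmap := pv_foldl_insertBy_map
            (fun a b : Int × Int × PvBox => decide (a.1 < b.1) || !decide (b.1 < a.1) && decide (a.2.1 < b.2.1))
            (fun a b : PvBox => decide (a.1.1 < b.1.1))
            (fun it : PvBox => (g, it.1.1, it)) grp ?_ []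
          · simp only [List.map_nil] at hmap
            rw [hmap, List.map_map]
            rw [show ((fun t : Int × Int × PvBox => t.2.2) ∘ fun it : PvBox => (g, it.1.1, it)) = id from rfl, List.map_id]
          · intro a b; simp
        · exact ih (g + 1)
      · intro x hx a ha
        rcases List.mem_map.mp ha with ⟨b, _, rfl⟩
        have := pv_mem_pvAnn_fst gs (g + 1) x hx
        simp only []
        have h1 : ¬ (x.1 < g) := by omega
        have h2 : (g : Int) < x.1 := by omega
        simp [h1, h2]

-- ===== VERDICT (by name: the statement is the Claim_ definition above) =====
theorem sort_panels_spec : Claim_equal_sort_panels := by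
  intro bs thr _ hpre
  unfold Spec_sort_panels sort_panels sort_panels_alt
  have hs : PySem.List.sorted bs (fun item => item.1.2.1) false ≠ [] := by
    intro h
    exact hpre ((PySem.List.sorted_eq_nil_iff bs (fun item => item.1.2.1) false).mp h)
  cases hsv : PySem.List.sorted bs (fun item => item.1.2.1) false with
  | nil => exact absurd hsv hs
  | cons first rest =>
      simp only []
      have hkeyed : ((first :: rest).foldl (pvStepB thr) ([], 0, none)).1 = pvAnn 0 (pvGroupsF thr first [first] rest) := by
        simp only [List.foldl_cons, pvStepB]
        have := pvFoldB_eq thr rest [] 0 [first] first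
        simpa using this
      rw [hkeyed, pvGroupsA_eq thr rest first [] [first] (by simp)]
      simp only [List.nil_append]
      exact (pv_sorted2_pvAnn (pvGroupsF thr first [first] rest) 0).symm

@[simp] theorem sort_panels_raises : Claim_raises_sort_panels := by
  unfold Claim_raises_sort_panels
  exact ⟨fun bs thr _ hr hp => hp hr, by decide⟩
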